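-- pv_equiv track=rewrite | github.com/its-philipp/mcp_audit_compliance_platform | src/agents/policy_engine_agent.py | _parse_request_type
-- ===== SOURCE A (Python) =====
-- def _parse_request_type(user_input: str) -> str:
--     """
--     Parse the user input to determine the type of request.
--
--     Args:
--         user_input: Natural language input from user
--
--     Returns:
--         Type of request (validate_data, check_compliance, etc.)
--     """
--     user_input_lower = user_input.lower()
--
--     if any(word in user_input_lower for word in ["validate", "check", "verify", "audit"]):
--         return "validate_data"
--     elif any(word in user_input_lower for word in ["compliance", "compliant", "regulation"]):
--         return "check_compliance"
--     elif any(word in user_input_lower for word in ["recommend", "suggest", "policy"]):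
--         return "policy_recommendations"
--     elif any(word in user_input_lower for word in ["regulatory", "sox", "gaap", "ifrs"]):
--         return "regulatory_check"
--     elif any(word in user_input_lower for word in ["report", "summary", "overview"]):
--         return "compliance_report"
--     else:
--         return "all"
-- ===== SOURCE B (Python) =====
-- _KEYWORD_RANK = {
--     "validate": 0, "check": 0, "verify": 0, "audit": 0,
--     "compliance": 1, "compliant": 1, "regulation": 1,
--     "recommend": 2, "suggest": 2, "policy": 2,
--     "regulatory": 3, "sox": 3, "gaap": 3, "ifrs": 3,
--     "report": 4, "summary": 4, "overview": 4,
-- }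
-- _TYPES = ["validate_data", "check_compliance", "policy_recommendations",
--           "regulatory_check", "compliance_report", "all"]
--
--
-- def _parse_request_type(user_input: str) -> str:
--     # One scan over the positions of the lowered input: at each position,
--     # note every keyword starting there and keep the best (smallest) rank.
--     lower = user_input.lower()
--     best = 5
--     for i in range(len(lower)):
--         for kw, rank in _KEYWORD_RANK.items():
--             if rank < best and lower.startswith(kw, i):
--                 best = rank
--     return _TYPES[best]
-- ===== Notes on version B (the rewrite author's own statement) =====
-- stated objective: alternative
-- what changed: Instead of A's five per-rule substring searches (one scan of the input per keyword), B makes a single left-to-right scan over the positions of the lowered input, at each position checking which keywords start there and keeping the minimum-priority rank matched, then indexes a result table by that rank.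
import Mathlib
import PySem

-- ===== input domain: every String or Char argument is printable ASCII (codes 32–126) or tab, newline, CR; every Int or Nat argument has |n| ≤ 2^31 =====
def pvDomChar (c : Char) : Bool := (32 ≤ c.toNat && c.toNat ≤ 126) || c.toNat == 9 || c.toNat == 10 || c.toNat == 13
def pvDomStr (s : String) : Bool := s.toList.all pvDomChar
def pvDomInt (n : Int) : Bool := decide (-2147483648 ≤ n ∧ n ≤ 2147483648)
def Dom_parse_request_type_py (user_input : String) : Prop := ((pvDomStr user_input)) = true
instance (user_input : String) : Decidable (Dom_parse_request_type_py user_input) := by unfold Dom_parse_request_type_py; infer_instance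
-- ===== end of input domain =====

-- B replaces A's five per-rule substring searches by a single left-to-right scan over
-- the positions of the lowered input, keeping the minimum-priority keyword rank matched
-- (alternative algorithm; same behaviour).


-- ===== PORT A =====
def parse_request_type_py (user_input : String) : String :=
  let user_input_lower := PySem.Str.lower user_input
  if ["validate", "check", "verify", "audit"].any
      (fun word => PySem.Str.isIn word user_input_lower) then
    "validate_data"
  else if ["compliance", "compliant", "regulation"].any
      (fun word => PySem.Str.isIn word user_input_lower) then
    "check_compliance"
  else if ["recommend", "suggest", "policy"].any
      (fun word => PySem.Str.isIn word user_input_lower) then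
    "policy_recommendations"
  else if ["regulatory", "sox", "gaap", "ifrs"].any
      (fun word => PySem.Str.isIn word user_input_lower) then
    "regulatory_check"
  else if ["report", "summary", "overview"].any
      (fun word => PySem.Str.isIn word user_input_lower) then
    "compliance_report"
  else
    "all"

-- ===== PORT B =====
-- _KEYWORD_RANK (a dict with distinct keys, insertion order)
def pvKwRank : List (List Char × Nat) :=
  [("validate".toList, 0), ("check".toList, 0), ("verify".toList, 0), ("audit".toList, 0),
   ("compliance".toList, 1), ("compliant".toList, 1), ("regulation".toList, 1),
   ("recommend".toList, 2), ("suggest".toList, 2), ("policy".toList, 2),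
   ("regulatory".toList, 3), ("sox".toList, 3), ("gaap".toList, 3), ("ifrs".toList, 3),
   ("report".toList, 4), ("summary".toList, 4), ("overview".toList, 4)]

-- _TYPES
def pvTypes : List String :=
  ["validate_data", "check_compliance", "policy_recommendations",
   "regulatory_check", "compliance_report", "all"]

-- the inner loop body: 'if rank < best and lower.startswith(kw, i): best = rank'
-- (Python's lower.startswith(kw, i) with 0 ≤ i is exactly startswith on lower[i:])
def pvStep (t : List Char) (b : Nat) (p : List Char × Nat) : Nat :=
  if decide (p.2 < b) && PySem.Chars.startswith t p.1 then p.2 else b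

-- 'best = 5; for i in range(len(lower)): for kw, rank in _KEYWORD_RANK.items(): …'
def pvBestRank (s : List Char) : Nat :=
  (List.range s.length).foldl (fun b i => pvKwRank.foldl (pvStep (s.drop i)) b) 5

def parse_request_type_py_alt (user_input : String) : String :=
  let lower := (PySem.Str.lower user_input).toList
  -- _TYPES[best]; best ≤ 5 always (it starts at 5 and only decreases), so no IndexError
  (PySem.List.pyGet? pvTypes (pvBestRank lower : Int)).getD ""

-- ===== PRECONDITION & SPEC =====
def Spec_parse_request_type_py (user_input : String) (out : String) : Prop := out = parse_request_type_py_alt user_input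
instance (user_input : String) (out : String) : Decidable (Spec_parse_request_type_py user_input out) := by unfold Spec_parse_request_type_py; infer_instance

-- ===== CLAIM (what is proved, stated in full; the proofs are below) =====
def Claim_equal_parse_request_type_py : Prop := ∀ (user_input : String), Dom_parse_request_type_py user_input → Spec_parse_request_type_py user_input (parse_request_type_py user_input)

-- ===== LEMMAS AND PROOFS =====

theorem pvStep_le (t : List Char) (b : Nat) (p : List Char × Nat) : pvStep t b p ≤ b := by
  unfold pvStep; split_ifs with h
  · simp only [Bool.and_eq_true, decide_eq_true_eq] at h; omega
  · exact le_refl b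

theorem pvInner_le (L : List (List Char × Nat)) (t : List Char) (b : Nat) :
    L.foldl (pvStep t) b ≤ b := by
  induction L generalizing b with
  | nil => simp
  | cons q L ih =>
      simp only [List.foldl_cons]
      exact le_trans (ih _) (pvStep_le t b q)

theorem pvInner_min (L : List (List Char × Nat)) (t : List Char) (b : Nat) :
    ∀ p ∈ L, p.1 <+: t → L.foldl (pvStep t) b ≤ p.2 := by
  induction L generalizing b with
  | nil => intro p hp; cases hp
  | cons q L ih =>
      intro p hp hpre
      simp only [List.foldl_cons]
      rcases List.mem_cons.mp hp with rfl | hmem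
      · refine le_trans (pvInner_le L t _) ?_
        unfold pvStep
        split_ifs with h
        · exact le_refl _
        · simp only [Bool.and_eq_true, decide_eq_true_eq] at h
          by_contra hc
          exact h ⟨by omega, (PySem.Chars.startswith_iff _ _).mpr hpre⟩
      · exact ih _ p hmem hpre

theorem pvInner_cases (L : List (List Char × Nat)) (t : List Char) (b : Nat) :
    L.foldl (pvStep t) b = b ∨ ∃ p ∈ L, p.1 <+: t ∧ L.foldl (pvStep t) b = p.2 := by
  induction L generalizing b with
  | nil => exact Or.inl rfl
  | cons q L ih =>
      simp only [List.foldl_cons]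
      rcases ih (pvStep t b q) with h | ⟨p, hp, hpre, he⟩
      · by_cases hc : (decide (q.2 < b) && PySem.Chars.startswith t q.1) = true
        · refine Or.inr ⟨q, List.mem_cons_self, ?_, ?_⟩
          · have hc2 : PySem.Chars.startswith t q.1 = true := by
              simp only [Bool.and_eq_true] at hc; exact hc.2
            exact (PySem.Chars.startswith_iff _ _).mp hc2
          · rw [h]; unfold pvStep; rw [if_pos hc]
        · left; rw [h]; unfold pvStep; rw [if_neg hc]
      · exact Or.inr ⟨p, List.mem_cons_of_mem q hp, hpre, he⟩

theorem pvOuter_le (I : List Nat) (s : List Char) (b : Nat) :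
    I.foldl (fun b i => pvKwRank.foldl (pvStep (s.drop i)) b) b ≤ b := by
  induction I generalizing b with
  | nil => simp
  | cons i I ih =>
      simp only [List.foldl_cons]
      exact le_trans (ih _) (pvInner_le _ _ _)

theorem pvOuter_min (I : List Nat) (s : List Char) (b : Nat)
    (p : List Char × Nat) (hp : p ∈ pvKwRank) :
    ∀ i ∈ I, p.1 <+: s.drop i → I.foldl (fun b i => pvKwRank.foldl (pvStep (s.drop i)) b) b ≤ p.2 := by
  induction I generalizing b with
  | nil => intro i hi; cases hi
  | cons j I ih =>
      intro i hi hpre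
      simp only [List.foldl_cons]
      rcases List.mem_cons.mp hi with rfl | hmem
      · exact le_trans (pvOuter_le I s _) (pvInner_min _ _ _ p hp hpre)
      · exact ih _ i hmem hpre

theorem pvOuter_cases (I : List Nat) (s : List Char) (b : Nat) :
    I.foldl (fun b i => pvKwRank.foldl (pvStep (s.drop i)) b) b = b ∨
      ∃ i ∈ I, ∃ p ∈ pvKwRank, p.1 <+: s.drop i ∧
        I.foldl (fun b i => pvKwRank.foldl (pvStep (s.drop i)) b) b = p.2 := by
  induction I generalizing b with
  | nil => exact Or.inl rfl
  | cons j I ih =>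
      simp only [List.foldl_cons]
      rcases ih (pvKwRank.foldl (pvStep (s.drop j)) b) with h | ⟨i, hi, p, hp, hpre, he⟩
      · rcases pvInner_cases pvKwRank (s.drop j) b with h2 | ⟨p, hp, hpre, he⟩
        · left; rw [h, h2]
        · exact Or.inr ⟨j, List.mem_cons_self, p, hp, hpre, by rw [h, he]⟩
      · exact Or.inr ⟨i, List.mem_cons_of_mem j hi, p, hp, hpre, he⟩

-- any keyword of rank r that occurs in s bounds the scan result by r
theorem pvHit_bound (s : List Char) (w : List Char) (r : Nat)
    (hw : (w, r) ∈ pvKwRank) (hne : w ≠ []) (hin : PySem.Chars.isIn w s = true) :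
    pvBestRank s ≤ r := by
  obtain ⟨j, hpre⟩ := (PySem.Chars.exists_prefix_drop_iff_isIn w s).mpr hin
  have hj : j < s.length := by
    by_contra hc
    rw [Nat.not_lt] at hc
    rw [List.drop_eq_nil_of_le hc] at hpre
    exact hne (List.prefix_nil.mp hpre)
  exact pvOuter_min _ s 5 (w, r) hw j (List.mem_range.mpr hj) hpre

theorem pvBest_cases (s : List Char) :
    pvBestRank s = 5 ∨
      ∃ p ∈ pvKwRank, PySem.Chars.isIn p.1 s = true ∧ pvBestRank s = p.2 := by
  rcases pvOuter_cases (List.range s.length) s 5 with h | ⟨i, _, p, hp, hpre, he⟩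
  · exact Or.inl h
  · exact Or.inr ⟨p, hp, (PySem.Chars.exists_prefix_drop_iff_isIn p.1 s).mp ⟨i, hpre⟩, he⟩

-- a table entry that occurs in s makes the keyword group of its rank fire
theorem pvMem_rank (s : List Char) (p : List Char × Nat) (hp : p ∈ pvKwRank)
    (h : PySem.Chars.isIn p.1 s = true) :
    (p.2 = 0 ∧ (["validate", "check", "verify", "audit"].any
        (fun w => PySem.Chars.isIn w.toList s)) = true) ∨
    (p.2 = 1 ∧ (["compliance", "compliant", "regulation"].any
        (fun w => PySem.Chars.isIn w.toList s)) = true) ∨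
    (p.2 = 2 ∧ (["recommend", "suggest", "policy"].any
        (fun w => PySem.Chars.isIn w.toList s)) = true) ∨
    (p.2 = 3 ∧ (["regulatory", "sox", "gaap", "ifrs"].any
        (fun w => PySem.Chars.isIn w.toList s)) = true) ∨
    (p.2 = 4 ∧ (["report", "summary", "overview"].any
        (fun w => PySem.Chars.isIn w.toList s)) = true) := by
  fin_cases hp <;> simp_all

-- characterization of the scan: it computes exactly A's first-matching-group rank
theorem pvBestRank_spec (s : List Char) :
    pvBestRank s =
      (if (["validate", "check", "verify", "audit"].any
            (fun w => PySem.Chars.isIn w.toList s)) then 0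
       else if (["compliance", "compliant", "regulation"].any
            (fun w => PySem.Chars.isIn w.toList s)) then 1
       else if (["recommend", "suggest", "policy"].any
            (fun w => PySem.Chars.isIn w.toList s)) then 2
       else if (["regulatory", "sox", "gaap", "ifrs"].any
            (fun w => PySem.Chars.isIn w.toList s)) then 3
       else if (["report", "summary", "overview"].any
            (fun w => PySem.Chars.isIn w.toList s)) then 4
       else 5) := by
  by_cases h0 : (["validate", "check", "verify", "audit"].any
      (fun w => PySem.Chars.isIn w.toList s)) = true
  · rw [if_pos h0]
    have hb : pvBestRank s ≤ 0 := by
      simp only [List.any_cons, List.any_nil, Bool.or_eq_true, Bool.or_false] at h0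
      rcases h0 with h | h | h | h <;> exact pvHit_bound s _ 0 (by decide) (by decide) h
    exact Nat.le_zero.mp hb
  · rw [if_neg h0]
    by_cases h1 : (["compliance", "compliant", "regulation"].any
        (fun w => PySem.Chars.isIn w.toList s)) = true
    · rw [if_pos h1]
      have hb : pvBestRank s ≤ 1 := by
        simp only [List.any_cons, List.any_nil, Bool.or_eq_true, Bool.or_false] at h1
        rcases h1 with h | h | h <;> exact pvHit_bound s _ 1 (by decide) (by decide) h
      refine le_antisymm hb ?_
      rcases pvBest_cases s with h | ⟨p, hp, hin, he⟩
      · rw [h]; decide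
      · rw [he]
        rcases pvMem_rank s p hp hin with ⟨hr, hg⟩ | ⟨hr, hg⟩ | ⟨hr, hg⟩ | ⟨hr, hg⟩ | ⟨hr, hg⟩
        · exact absurd hg h0
        all_goals rw [hr]
        all_goals decide
    · rw [if_neg h1]
      by_cases h2 : (["recommend", "suggest", "policy"].any
          (fun w => PySem.Chars.isIn w.toList s)) = true
      · rw [if_pos h2]
        have hb : pvBestRank s ≤ 2 := by
          simp only [List.any_cons, List.any_nil, Bool.or_eq_true, Bool.or_false] at h2
          rcases h2 with h | h | h <;> exact pvHit_bound s _ 2 (by decide) (by decide) h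
        refine le_antisymm hb ?_
        rcases pvBest_cases s with h | ⟨p, hp, hin, he⟩
        · rw [h]; decide
        · rw [he]
          rcases pvMem_rank s p hp hin with ⟨hr, hg⟩ | ⟨hr, hg⟩ | ⟨hr, hg⟩ | ⟨hr, hg⟩ | ⟨hr, hg⟩
          · exact absurd hg h0
          · exact absurd hg h1
          all_goals rw [hr]
          all_goals decide
      · rw [if_neg h2]
        by_cases h3 : (["regulatory", "sox", "gaap", "ifrs"].any
            (fun w => PySem.Chars.isIn w.toList s)) = true
        · rw [if_pos h3]
          have hb : pvBestRank s ≤ 3 := by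
            simp only [List.any_cons, List.any_nil, Bool.or_eq_true, Bool.or_false] at h3
            rcases h3 with h | h | h | h <;> exact pvHit_bound s _ 3 (by decide) (by decide) h
          refine le_antisymm hb ?_
          rcases pvBest_cases s with h | ⟨p, hp, hin, he⟩
          · rw [h]; decide
          · rw [he]
            rcases pvMem_rank s p hp hin with ⟨hr, hg⟩ | ⟨hr, hg⟩ | ⟨hr, hg⟩ | ⟨hr, hg⟩ | ⟨hr, hg⟩
            · exact absurd hg h0
            · exact absurd hg h1
            · exact absurd hg h2
            all_goals rw [hr]
            all_goals decide
        · rw [if_neg h3]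
          by_cases h4 : (["report", "summary", "overview"].any
              (fun w => PySem.Chars.isIn w.toList s)) = true
          · rw [if_pos h4]
            have hb : pvBestRank s ≤ 4 := by
              simp only [List.any_cons, List.any_nil, Bool.or_eq_true, Bool.or_false] at h4
              rcases h4 with h | h | h <;> exact pvHit_bound s _ 4 (by decide) (by decide) h
            refine le_antisymm hb ?_
            rcases pvBest_cases s with h | ⟨p, hp, hin, he⟩
            · rw [h]; decide
            · rw [he]
              rcases pvMem_rank s p hp hin with ⟨hr, hg⟩ | ⟨hr, hg⟩ | ⟨hr, hg⟩ | ⟨hr, hg⟩ | ⟨hr, hg⟩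
              · exact absurd hg h0
              · exact absurd hg h1
              · exact absurd hg h2
              · exact absurd hg h3
              · rw [hr]
          · rw [if_neg h4]
            rcases pvBest_cases s with h | ⟨p, hp, hin, he⟩
            · exact h
            · rcases pvMem_rank s p hp hin with ⟨hr, hg⟩ | ⟨hr, hg⟩ | ⟨hr, hg⟩ | ⟨hr, hg⟩ | ⟨hr, hg⟩
              · exact absurd hg h0
              · exact absurd hg h1
              · exact absurd hg h2
              · exact absurd hg h3
              · exact absurd hg h4

-- ===== VERDICT (by name: the statement is the Claim_ definition above) =====
theorem parse_request_type_py_spec : Claim_equal_parse_request_type_py := by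
  intro u _
  unfold Spec_parse_request_type_py parse_request_type_py parse_request_type_py_alt
  simp only [pvBestRank_spec, PySem.Str.isIn_eq]
  split_ifs <;> decide
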